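-- pv_equiv track=rewrite | github.com/yiangos/python-text-to-brainfuck | BFGenerator.py | text2BF
-- ===== SOURCE A (Python) =====
-- def text2BF(data):
--     """Converts a string into a BF program. Returns the BF code"""
--     glyphs = len(set([c for c in data]))
--     number_of_bins = max(max([ord(c) for c in data]) // glyphs,1)
--     # Create an array that emulates the BF memory array as if the
--     # code we are generating was being executed. Initialize the
--     # array by creating as many elements as different glyphs in
--     # the original string. Then each "bin" gets an initial value
--     # which is determined by the actual message.
--     # FIXME: I can see how this can become a problem for languages
--     # that don't use a phonetic alphabet, such as Chinese.
--     bins = [(i + 1) * number_of_bins for i in range(glyphs)]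
--     code="+" * number_of_bins + "["
--     code+="".join([">"+("+"*(i+1)) for i in range(1,glyphs)])
--     code+="<"*(glyphs-1) + "-]"
--     code+="+" * number_of_bins
--     # For each character in the original message, find the position
--     # that holds the value closest to the character's ordinal, then
--     # generate the BF code to move the memory pointer to that memory
--     # position, get the value of that memory position to be equal
--     # to the ordinal of the character and print it (i.e. print the
--     # character).
--     current_bin=0
--     for char in data:
--         new_bin=[abs(ord(char)-b)
--                  for b in bins].index(min([abs(ord(char)-b)
--                                            for b in bins]))
--         appending_character=""
--         if new_bin-current_bin>0:
--             appending_character=">"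
--         else:
--             appending_character="<"
--         code+=appending_character * abs(new_bin-current_bin)
--         if ord(char)-bins[new_bin]>0:
--             appending_character="+"
--         else:
--             appending_character="-"
--         code+=(appending_character * abs( ord(char)-bins[new_bin])) +"."
--         current_bin=new_bin
--         bins[new_bin]=ord(char)
--     return code
-- ===== SOURCE B (Python) =====
-- def text2BF(data):
--     """Converts a string into a BF program. Returns the BF code"""
--     glyphs = len(set(data))
--     number_of_bins = max(max(ord(c) for c in data) // glyphs, 1)
--     bins = [(i + 1) * number_of_bins for i in range(glyphs)]
--     parts = ["+" * number_of_bins + "["]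
--     for i in range(1, glyphs):
--         parts.append(">" + "+" * (i + 1))
--     parts.append("<" * (glyphs - 1) + "-]" + "+" * number_of_bins)
--     current_bin = 0
--     for char in data:
--         c = ord(char)
--         # bins stays strictly increasing, so the nearest bin sits at the
--         # insertion point of c: scan to the first bin >= c and compare it
--         # with its left neighbour (ties go left = first-index argmin).
--         new_bin = None
--         prev = None
--         for i, b in enumerate(bins):
--             if b >= c:
--                 if prev is not None and c - prev <= b - c:
--                     new_bin = i - 1
--                 else:
--                     new_bin = i
--                 break
--             prev = b
--         if new_bin is None:
--             new_bin = len(bins) - 1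
--         target = bins[new_bin]
--         parts.append((">" if new_bin > current_bin else "<") * abs(new_bin - current_bin))
--         parts.append(("+" if c > target else "-") * abs(c - target) + ".")
--         current_bin = new_bin
--         bins[new_bin] = c
--     return "".join(parts)
-- ===== Notes on version B (the rewrite author's own statement) =====
-- stated objective: faster
-- what changed: Per character, A rebuilds the full |ord(c)-bin| distance list twice and calls min() plus list.index() (three O(g) passes with list allocations); B exploits the invariant that the bins list stays strictly increasing and finds the nearest bin by a single early-exit scan to the insertion point of ord(c), comparing it with its left neighbour (ties go left), and assembles the output from a parts list joined once instead of repeated string concatenation.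
import Mathlib
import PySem

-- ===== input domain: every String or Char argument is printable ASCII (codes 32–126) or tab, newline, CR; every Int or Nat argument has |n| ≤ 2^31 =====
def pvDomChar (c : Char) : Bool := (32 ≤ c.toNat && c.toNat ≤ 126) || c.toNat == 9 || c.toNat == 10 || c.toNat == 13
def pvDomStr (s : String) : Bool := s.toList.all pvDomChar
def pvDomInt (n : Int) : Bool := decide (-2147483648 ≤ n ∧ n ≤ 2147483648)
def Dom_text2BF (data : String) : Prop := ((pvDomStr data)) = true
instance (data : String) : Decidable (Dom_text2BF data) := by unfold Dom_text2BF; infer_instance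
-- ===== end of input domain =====

-- B replaces A's three full distance-list passes per character (two list
-- comprehensions, min(), list.index()) by a single early-exit scan to the insertion
-- point of ord(c) in the strictly increasing bins list (ties go to the left
-- neighbour), and joins a parts list once instead of repeated concatenation.

-- ===== PORT A =====
def pvOrd (c : Char) : Int := (c.toNat : Int)

-- "x" * n  (Python gives "" for n ≤ 0)
def pvRep (c : Char) (n : Int) : List Char := List.replicate n.toNat c

def pvStepA (st : List Char × Int × List Int) (char : Char) : List Char × Int × List Int :=
  let code := st.1
  let cur := st.2.1
  let bins := st.2.2
  let dists := bins.map (fun b => |pvOrd char - b|)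
  let newBin : Int := (((PySem.List.index? dists ((PySem.List.min? dists (fun x => x)).getD 0)).getD 0 : Nat) : Int)
  let moveChar := if newBin - cur > 0 then '>' else '<'
  let code := code ++ pvRep moveChar (|newBin - cur|)
  let bv := PySem.List.pyGetD bins newBin 0
  let adjChar := if pvOrd char - bv > 0 then '+' else '-'
  let code := code ++ pvRep adjChar (|pvOrd char - bv|) ++ ['.']
  (code, newBin, PySem.List.pySetD bins newBin (pvOrd char))

def text2BF (data : String) : String :=
  let chars := data.toList
  let glyphs : Int := ((PySem.Set.ofList chars).length : Int)
  let nob : Int := max (PySem.Int.floordiv ((PySem.List.max? (chars.map pvOrd) (fun x => x)).getD 0) glyphs) 1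
  let bins : List Int := (PySem.List.pyRange 0 glyphs 1).map (fun i => (i + 1) * nob)
  let code := pvRep '+' nob ++ ['[']
  let code := code ++ ((PySem.List.pyRange 1 glyphs 1).map (fun i => '>' :: pvRep '+' (i + 1))).flatten
  let code := code ++ pvRep '<' (glyphs - 1) ++ ['-', ']']
  let code := code ++ pvRep '+' nob
  String.ofList (chars.foldl pvStepA (code, 0, bins)).1

-- ===== PORT B =====
-- the inner early-exit scan of Source B (i = position, prev = bins[i-1] if i > 0)
def pvNearest (c : Int) : List Int → Nat → Option Int → Int
  | [], i, _ => (i : Int) - 1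
  | b :: rest, i, prev =>
    if b ≥ c then
      match prev with
      | some p => if c - p ≤ b - c then (i : Int) - 1 else (i : Int)
      | none => (i : Int)
    else pvNearest c rest (i + 1) (some b)

def pvStepB (st : List (List Char) × Int × List Int) (char : Char) :
    List (List Char) × Int × List Int :=
  let parts := st.1
  let cur := st.2.1
  let bins := st.2.2
  let c := pvOrd char
  let newBin := pvNearest c bins 0 none
  let target := PySem.List.pyGetD bins newBin 0
  let parts := parts ++ [pvRep (if newBin > cur then '>' else '<') (|newBin - cur|)]
  let parts := parts ++ [pvRep (if c > target then '+' else '-') (|c - target|) ++ ['.']]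
  (parts, newBin, PySem.List.pySetD bins newBin c)

def text2BF_alt (data : String) : String :=
  let chars := data.toList
  let glyphs : Int := ((PySem.Set.ofList chars).length : Int)
  let nob : Int := max (PySem.Int.floordiv ((PySem.List.max? (chars.map pvOrd) (fun x => x)).getD 0) glyphs) 1
  let bins : List Int := (PySem.List.pyRange 0 glyphs 1).map (fun i => (i + 1) * nob)
  let parts := [pvRep '+' nob ++ ['[']]
  let parts := parts ++ (PySem.List.pyRange 1 glyphs 1).map (fun i => '>' :: pvRep '+' (i + 1))
  let parts := parts ++ [pvRep '<' (glyphs - 1) ++ ['-', ']'] ++ pvRep '+' nob]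
  String.ofList ((chars.foldl pvStepB (parts, 0, bins)).1.flatten)

-- ===== PRECONDITION & SPEC =====
-- A raises ValueError on the empty string (max() of an empty sequence); so does B.
def Pre_text2BF (data : String) : Prop := data ≠ ""
instance (data : String) : Decidable (Pre_text2BF data) := by unfold Pre_text2BF; infer_instance
def pvWitness_text2BF : String := "ab"

def Spec_text2BF (data : String) (out : String) : Prop := out = text2BF_alt data
instance (data : String) (out : String) : Decidable (Spec_text2BF data out) := by unfold Spec_text2BF; infer_instance

-- ===== CLAIM (what is proved, stated in full; the proofs are below) =====
def Claim_equal_text2BF : Prop := ∀ (data : String), Dom_text2BF data → Pre_text2BF data → Spec_text2BF data (text2BF data)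

-- ===== LEMMAS AND PROOFS =====

-- the common value of both nearest-bin computations, in recursive form
def pvNear (c : Int) : List Int → Nat
  | [] => 0
  | [_] => 0
  | b :: b' :: rest =>
    if c ≤ b then 0
    else if c ≤ b' ∧ c - b ≤ b' - c then 0
    else pvNear c (b' :: rest) + 1

theorem pvNear_le (c b : Int) (rest : List Int) (hb : c ≤ b) : pvNear c (b :: rest) = 0 := by
  cases rest <;> simp [pvNear, hb]

theorem pvNear_cons₂_zero (c b b' : Int) (rest : List Int) (hb : ¬ c ≤ b)
    (hcase : c ≤ b' ∧ c - b ≤ b' - c) : pvNear c (b :: b' :: rest) = 0 := by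
  simp only [pvNear]
  rw [if_neg hb, if_pos hcase]

theorem pvNear_cons₂ (c b b' : Int) (rest : List Int) (hb : ¬ c ≤ b)
    (hcase : ¬ (c ≤ b' ∧ c - b ≤ b' - c)) :
    pvNear c (b :: b' :: rest) = pvNear c (b' :: rest) + 1 := by
  simp only [pvNear]
  rw [if_neg hb, if_neg hcase]

theorem pvNearest_go_eq (c : Int) : ∀ (bins : List Int) (b : Int) (i : Nat), b < c →
    pvNearest c bins (i + 1) (some b) = ((i + pvNear c (b :: bins) : Nat) : Int) := by
  intro bins
  induction bins with
  | nil =>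
    intro b i hb
    simp only [pvNearest, pvNear]
    push_cast
    ring
  | cons b' rest ih =>
    intro b i hb
    have hnb : ¬ c ≤ b := not_le.mpr hb
    by_cases h' : c ≤ b'
    · by_cases ht : c - b ≤ b' - c
      · have hne : pvNear c (b :: b' :: rest) = 0 := by simp [pvNear, hnb, h', ht]
        simp only [pvNearest, ge_iff_le, h', if_true, ht, if_true, hne]
        push_cast
        ring
      · have h0 : pvNear c (b' :: rest) = 0 := by cases rest <;> simp [pvNear, h']
        have hne : pvNear c (b :: b' :: rest) = 1 := by simp [pvNear, hnb, ht, h0]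
        simp only [pvNearest, ge_iff_le, h', if_true, ht, if_false, hne]
    · have hb' : b' < c := not_le.mp h'
      have hne : pvNear c (b :: b' :: rest) = pvNear c (b' :: rest) + 1 := by
        simp [pvNear, hnb, h']
      rw [show pvNearest c (b' :: rest) (i + 1) (some b) = pvNearest c rest (i + 1 + 1) (some b') by
        simp [pvNearest, h']]
      rw [ih b' (i + 1) hb', hne]
      push_cast
      ring

theorem pvNearest_eq (c : Int) (bins : List Int) (h : bins ≠ []) :
    pvNearest c bins 0 none = ((pvNear c bins : Nat) : Int) := by
  match bins with
  | b :: rest =>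
    by_cases hb : c ≤ b
    · have h0 : pvNear c (b :: rest) = 0 := pvNear_le c b rest hb
      simp [pvNearest, hb, h0]
    · simp only [pvNearest, ge_iff_le, hb, if_false]
      simpa using pvNearest_go_eq c rest b 0 (not_le.mp hb)

-- A's argmin-by-index expression
def pvAIdx (l : List Int) : Nat :=
  (PySem.List.index? l ((PySem.List.min? l (fun x => x)).getD 0)).getD 0

theorem foldl_min_of_le (t : List Int) : ∀ (x : Int), (∀ y ∈ t, x ≤ y) → t.foldl min x = x := by
  induction t with
  | nil => intro x _; rfl
  | cons a t ih =>
    intro x hx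
    have hxa : x ≤ a := hx a (by simp)
    simp only [List.foldl_cons, min_eq_left hxa]
    exact ih x (fun y hy => hx y (by simp [hy]))

theorem foldl_min_min (t : List Int) : ∀ (d a : Int), t.foldl min (min d a) = min d (t.foldl min a) := by
  induction t with
  | nil => intro d a; rfl
  | cons x t ih =>
    intro d a
    simp only [List.foldl_cons]
    rw [min_assoc, ih]

theorem pvAIdx_zero (d : Int) (t : List Int) (h : ∀ y ∈ t, d ≤ y) : pvAIdx (d :: t) = 0 := by
  unfold pvAIdx
  rw [PySem.List.min?_id_cons, foldl_min_of_le t d h, Option.getD_some,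
    PySem.List.index?_cons_self]
  rfl

theorem pvAIdx_succ (d : Int) (t : List Int) (h : ∃ y ∈ t, y < d) :
    pvAIdx (d :: t) = pvAIdx t + 1 := by
  obtain ⟨y, hy, hyd⟩ := h
  match t with
  | a :: t' =>
    have hmin : PySem.List.min? (a :: t') (fun x => x) = some (t'.foldl min a) :=
      PySem.List.min?_id_cons a t'
    have hm_min : ∀ z ∈ a :: t', t'.foldl min a ≤ z := fun z hz => PySem.List.min?_isMin hmin z hz
    have hmd : t'.foldl min a < d := lt_of_le_of_lt (hm_min y hy) hyd
    have hm_mem : (t'.foldl min a) ∈ a :: t' := PySem.List.min?_mem hmin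
    have hfold : (a :: t').foldl min d = t'.foldl min a := by
      simp only [List.foldl_cons]
      rw [foldl_min_min t' d a, min_eq_right (le_of_lt hmd)]
    unfold pvAIdx
    rw [PySem.List.min?_id_cons d (a :: t'), hmin]
    rw [Option.getD_some, Option.getD_some, hfold]
    rw [PySem.List.index?_cons_of_ne (a :: t') (ne_of_gt hmd)]
    have hsome : (PySem.List.index? (a :: t') (t'.foldl min a)).isSome := by
      rw [PySem.List.index?_isSome_iff]
      exact hm_mem
    obtain ⟨k, hk⟩ := Option.isSome_iff_exists.mp hsome
    rw [hk]
    rfl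

-- A's per-character argmin equals pvNear on a strictly increasing bins list
theorem pvAIdx_eq_pvNear (c : Int) : ∀ (bins : List Int), bins ≠ [] →
    bins.Pairwise (· < ·) → pvAIdx (bins.map (fun b => |c - b|)) = pvNear c bins := by
  intro bins
  induction bins with
  | nil => intro h; exact absurd rfl h
  | cons b rest ih =>
    intro _ hchain
    match rest, ih with
    | [], _ =>
      simp only [List.map_cons, List.map_nil, pvNear]
      exact pvAIdx_zero _ [] (by simp)
    | b' :: rest', ih =>
      have hpair : (b :: b' :: rest').Pairwise (· < ·) := hchain
      have hall : ∀ z ∈ b' :: rest', b < z := (List.pairwise_cons.mp hpair).1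
      have hbb' : b < b' := hall b' (by simp)
      have hall' : ∀ z ∈ rest', b' < z :=
        (List.pairwise_cons.mp (List.pairwise_cons.mp hpair).2).1
      by_cases hb : c ≤ b
      · have hle : ∀ y ∈ (b' :: rest').map (fun z => |c - z|), |c - b| ≤ y := by
          intro y hy
          simp only [List.mem_map] at hy
          obtain ⟨z, hz, rfl⟩ := hy
          have := hall z hz
          rw [abs_of_nonpos (by omega), abs_of_nonpos (by omega)]
          omega
        simp only [List.map_cons] at hle ⊢
        rw [pvAIdx_zero _ _ hle, pvNear_le c b _ hb]
      · have hbc : b < c := not_le.mp hb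
        by_cases hcase : c ≤ b' ∧ c - b ≤ b' - c
        · have hle : ∀ y ∈ (b' :: rest').map (fun z => |c - z|), |c - b| ≤ y := by
            intro y hy
            simp only [List.mem_map] at hy
            obtain ⟨z, hz, rfl⟩ := hy
            rcases List.mem_cons.mp hz with rfl | hz'
            · rw [abs_of_pos (by omega), abs_of_nonpos (by omega)]
              omega
            · have := hall' z hz'
              rw [abs_of_pos (by omega), abs_of_nonpos (by omega)]
              omega
          simp only [List.map_cons] at hle ⊢
          rw [pvAIdx_zero _ _ hle, pvNear_cons₂_zero c b b' rest' hb hcase]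
        · have hex : ∃ y ∈ ((b' :: rest').map (fun z => |c - z|)), y < |c - b| := by
            refine ⟨|c - b'|, by simp, ?_⟩
            rw [abs_of_pos (show (0 : Int) < c - b by omega)]
            by_cases h' : c ≤ b'
            · have ht : ¬ (c - b ≤ b' - c) := by tauto
              rw [abs_of_nonpos (by omega)]
              omega
            · rw [abs_of_pos (by omega)]
              omega
          have ihh := ih (by simp) (List.pairwise_cons.mp hchain).2
          simp only [List.map_cons] at hex ihh ⊢
          rw [pvAIdx_succ _ _ hex, ihh, pvNear_cons₂ c b b' rest' hb hcase]

-- the chosen index is in range and the update keeps bins strictly increasing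
theorem pvNear_range_set (c : Int) : ∀ (bins : List Int), bins ≠ [] →
    bins.Pairwise (· < ·) →
    pvNear c bins < bins.length ∧ (bins.set (pvNear c bins) c).Pairwise (· < ·) := by
  intro bins
  induction bins with
  | nil => intro h; exact absurd rfl h
  | cons b rest ih =>
    intro _ hchain
    match rest, ih with
    | [], _ => simp [pvNear]
    | b' :: rest', ih =>
      have hall : ∀ z ∈ b' :: rest', b < z := (List.pairwise_cons.mp hchain).1
      have hbb' : b < b' := hall b' (by simp)
      have htail : (b' :: rest').Pairwise (· < ·) := (List.pairwise_cons.mp hchain).2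
      by_cases hb : c ≤ b
      · refine ⟨by rw [pvNear_le c b _ hb]; simp, ?_⟩
        rw [pvNear_le c b _ hb]
        simp only [List.set_cons_zero]
        exact List.pairwise_cons.mpr ⟨fun z hz => lt_of_le_of_lt hb (hall z hz), htail⟩
      · by_cases hcase : c ≤ b' ∧ c - b ≤ b' - c
        · have hcb' : c < b' := by
            rcases hcase with ⟨h1, h2⟩
            rcases lt_or_eq_of_le h1 with h | h
            · exact h
            · omega
          refine ⟨by rw [pvNear_cons₂_zero c b b' rest' hb hcase]; simp, ?_⟩
          rw [pvNear_cons₂_zero c b b' rest' hb hcase]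
          simp only [List.set_cons_zero]
          refine List.pairwise_cons.mpr ⟨?_, htail⟩
          intro z hz
          rcases List.mem_cons.mp hz with rfl | hz'
          · exact hcb'
          · exact lt_trans hcb' ((List.pairwise_cons.mp htail).1 z hz')
        · obtain ⟨hlen, hset⟩ := ih (by simp) htail
          constructor
          · rw [pvNear_cons₂ c b b' rest' hb hcase]
            simp only [List.length_cons] at hlen ⊢
            omega
          · rw [pvNear_cons₂ c b b' rest' hb hcase]
            simp only [List.set_cons_succ]
            refine List.pairwise_cons.mpr ⟨?_, hset⟩
            intro y hy
            rcases List.mem_or_eq_of_mem_set hy with hy' | rfl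
            · exact hall y hy'
            · omega

-- one step of the two folds, related
theorem pvStep_eq (char : Char) (code : List Char) (parts : List (List Char)) (cur : Int)
    (bins : List Int) (hcode : code = parts.flatten) (hnil : bins ≠ [])
    (hchain : bins.Pairwise (· < ·)) :
    (pvStepA (code, cur, bins) char).1 = (pvStepB (parts, cur, bins) char).1.flatten ∧
    (pvStepA (code, cur, bins) char).2.1 = (pvStepB (parts, cur, bins) char).2.1 ∧
    (pvStepA (code, cur, bins) char).2.2 = (pvStepB (parts, cur, bins) char).2.2 ∧
    (pvStepB (parts, cur, bins) char).2.2 ≠ [] ∧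
    (pvStepB (parts, cur, bins) char).2.2.Pairwise (· < ·) := by
  have hN : pvNearest (pvOrd char) bins 0 none = ((pvNear (pvOrd char) bins : Nat) : Int) :=
    pvNearest_eq _ bins hnil
  have hA : pvAIdx (bins.map (fun b => |pvOrd char - b|)) = pvNear (pvOrd char) bins :=
    pvAIdx_eq_pvNear _ bins hnil hchain
  obtain ⟨hlen, hset⟩ := pvNear_range_set (pvOrd char) bins hnil hchain
  simp only [pvStepA, pvStepB, hN]
  rw [show (PySem.List.index? (bins.map fun b => |pvOrd char - b|)
        ((PySem.List.min? (bins.map fun b => |pvOrd char - b|) (fun x => x)).getD 0)).getD 0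
      = pvNear (pvOrd char) bins from hA]
  have hset' : PySem.List.pySetD bins ((pvNear (pvOrd char) bins : Nat) : Int) (pvOrd char)
      = bins.set (pvNear (pvOrd char) bins) (pvOrd char) := by
    rw [PySem.List.pySetD_natCast]
  refine ⟨?_, rfl, rfl, ?_, ?_⟩
  · rw [hcode]
    simp only [gt_iff_lt, Int.sub_pos, List.flatten_append, List.flatten_cons,
      List.flatten_nil, List.append_nil, List.append_assoc]
  · rw [hset']
    intro hcontra
    have := congrArg List.length hcontra
    simp only [List.length_set, List.length_nil] at this
    exact hnil (List.length_eq_zero_iff.mp this)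
  · rw [hset']
    exact hset

-- the fold invariant
theorem pvFold_eq : ∀ (chars : List Char) (code : List Char) (parts : List (List Char))
    (cur : Int) (bins : List Int), code = parts.flatten → bins ≠ [] →
    bins.Pairwise (· < ·) →
    (chars.foldl pvStepA (code, cur, bins)).1 =
      (chars.foldl pvStepB (parts, cur, bins)).1.flatten := by
  intro chars
  induction chars with
  | nil =>
    intro code parts cur bins h _ _
    simpa using h
  | cons ch rest ih =>
    intro code parts cur bins hcode hnil hchain
    obtain ⟨h1, h2, h3, h4, h5⟩ := pvStep_eq ch code parts cur bins hcode hnil hchain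
    simp only [List.foldl_cons]
    have hA : pvStepA (code, cur, bins) ch
        = ((pvStepA (code, cur, bins) ch).1,
           ((pvStepB (parts, cur, bins) ch).2.1, (pvStepB (parts, cur, bins) ch).2.2)) := by
      rw [← h2, ← h3]
    have hB : pvStepB (parts, cur, bins) ch
        = ((pvStepB (parts, cur, bins) ch).1,
           ((pvStepB (parts, cur, bins) ch).2.1, (pvStepB (parts, cur, bins) ch).2.2)) := rfl
    rw [hA, hB]
    exact ih _ _ _ _ h1 h4 h5

-- ===== VERDICT (by name: the statement is the Claim_ definition above) =====
theorem text2BF_spec : Claim_equal_text2BF := by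
  intro data _ hpre
  unfold Spec_text2BF
  show text2BF data = text2BF_alt data
  have hchars : data.toList ≠ [] := by
    intro h
    apply hpre
    have := congrArg String.ofList h
    simpa using this
  have hpos : 0 < (PySem.Set.ofList data.toList).length := by
    match hc : data.toList, hchars with
    | c :: cs, _ =>
      exact List.length_pos_of_mem ((PySem.Set.mem_ofList (c :: cs) c).mpr (by simp))
  simp only [text2BF, text2BF_alt]
  apply congrArg String.ofList
  apply pvFold_eq
  · simp only [List.flatten_append, List.flatten_cons, List.flatten_nil,
      List.append_nil, List.append_assoc]
  · intro hcontra
    have := congrArg List.length hcontra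
    simp only [List.length_map, PySem.List.length_pyRange_one, List.length_nil] at this
    omega
  · refine List.Pairwise.map _ ?_ (PySem.List.pairwise_lt_pyRange_one 0 _)
    intro a b hab
    have h1 : (1 : Int) ≤ max (PySem.Int.floordiv
        ((PySem.List.max? (data.toList.map pvOrd) (fun x => x)).getD 0)
        (Int.ofNat (PySem.Set.ofList data.toList).length)) 1 := le_max_right _ _
    exact mul_lt_mul_of_pos_right (by omega) (by omega)
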